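-- pv_equiv track=rewrite | github.com/use-ash/apex | server/local_model/safety.py | _command_matches_allowed_prefix
-- ===== SOURCE A (Python) =====
-- import shlex
--
-- def _normalize_command_text(command: str) -> str:
--     try:
--         return " ".join(shlex.split(command, posix=True))
--     except ValueError:
--         return " ".join(command.strip().split())
--
-- def _command_matches_allowed_prefix(command: str, allowed_commands: list[str] | None) -> bool:
--     normalized = _normalize_command_text(command)
--     for entry in allowed_commands or []:
--         prefix = _normalize_command_text(entry)
--         if not prefix:
--             continue
--         if normalized == prefix or normalized.startswith(prefix + " "):
--             return True
--     return False
-- ===== SOURCE B (Python) =====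
-- import re
--
-- # One lexical chunk of a POSIX-shell-style command line: a whitespace run,
-- # a single-quoted section, a double-quoted section, an escaped character,
-- # or a run of plain word characters.
-- _CHUNK = re.compile(
--     r"""[ \t\r\n]+|'[^']*'|"(?:[^"\\]|\\.)*"|\\.|[^ \t\r\n'"\\]+""",
--     re.DOTALL,
-- )
--
--
-- def _shell_words(text):
--     """Tokenize text like a POSIX shell with a regex scanner: whitespace
--     separates words, '...' is literal, "..." honours \\" and \\\\, a lone
--     backslash escapes the next character; adjacent chunks join into one word.
--     Returns None when the text is malformed (unclosed quote, dangling escape).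
--     """
--     words, current, pos = [], None, 0
--     for m in _CHUNK.finditer(text):
--         if m.start() != pos:
--             return None
--         chunk = m.group()
--         pos = m.end()
--         if chunk[0] in " \t\r\n":
--             if current is not None:
--                 words.append(current)
--             current = None
--             continue
--         if chunk[0] == "'":
--             piece = chunk[1:-1]
--         elif chunk[0] == '"':
--             piece = re.sub(r'\\([\\"])', r"\1", chunk[1:-1])
--         elif chunk[0] == "\\":
--             piece = chunk[1]
--         else:
--             piece = chunk
--         current = (current or "") + piece
--     if pos != len(text):
--         return None
--     if current is not None:
--         words.append(current)
--     return words
--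
--
-- def _normalize_command_text(command: str) -> str:
--     words = _shell_words(command)
--     if words is None:
--         words = command.strip().split()
--     return " ".join(words)
--
--
-- def _command_matches_allowed_prefix(command: str, allowed_commands: list[str] | None) -> bool:
--     # Index every word-boundary prefix of the command once, then test each
--     # allowed entry with a single set-membership lookup.
--     words = _normalize_command_text(command).split(" ")
--     prefixes = {tuple(words[:k]) for k in range(1, len(words) + 1)}
--     return any(
--         p and tuple(p.split(" ")) in prefixes
--         for p in map(_normalize_command_text, allowed_commands or [])
--     )
-- ===== Notes on version B (the rewrite author's own statement) =====
-- stated objective: faster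
-- what changed: B tokenizes with a compiled regex chunk scanner (instead of shlex.split's pure-Python character lexer), then indexes every word-boundary prefix of the normalized command in a set once and tests each allowed entry by a single membership lookup on its word tuple, instead of A's per-entry ==/startswith string comparisons.
import Mathlib
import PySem

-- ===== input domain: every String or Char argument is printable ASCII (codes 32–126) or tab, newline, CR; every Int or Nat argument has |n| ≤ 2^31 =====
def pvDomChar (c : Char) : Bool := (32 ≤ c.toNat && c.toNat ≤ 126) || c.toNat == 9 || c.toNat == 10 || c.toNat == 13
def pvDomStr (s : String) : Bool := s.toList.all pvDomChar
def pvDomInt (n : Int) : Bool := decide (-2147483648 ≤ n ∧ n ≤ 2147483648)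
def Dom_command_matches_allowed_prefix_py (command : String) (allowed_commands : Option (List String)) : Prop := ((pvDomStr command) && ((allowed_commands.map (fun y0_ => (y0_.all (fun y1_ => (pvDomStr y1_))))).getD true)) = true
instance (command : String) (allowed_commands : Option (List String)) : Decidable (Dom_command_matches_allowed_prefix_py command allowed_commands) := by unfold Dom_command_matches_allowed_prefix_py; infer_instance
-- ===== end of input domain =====

-- ===== PORT A =====
-- B normalizes via a compiled-regex chunk scanner instead of shlex's character lexer, indexes the
-- command's word-boundary prefixes in a set and tests each allowed entry by one membership lookup
-- (objective: faster by a constant factor, measured).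

-- Shared-module helper _normalize_command_text calls shlex.split(command, posix=True), which has no
-- PySem equivalent; A's port transcribes it as a character state machine over an explicit state type;
-- exact on the ASCII domain: whitespace is ' ','\t','\r','\n'; '\' escapes the next character
-- (dangling '\' = ValueError = none); '…' is literal (unclosed = ValueError); inside "…" a '\'
-- escapes only '"' and '\'.
inductive PvShState : Type
  | normal : Option (List Char) → PvShState   -- outside quotes; the open token, if any
  | esc    : List Char → PvShState            -- after '\' outside quotes
  | squote : List Char → PvShState            -- inside '…'
  | dquote : List Char → PvShState            -- inside "…"
  | dqesc  : List Char → PvShState            -- after '\' inside "…"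

def pvShlexGo : List Char → PvShState → Option (List (List Char))
  | [], PvShState.normal none => some []
  | [], PvShState.normal (some t) => some [t]
  | [], _ => none                             -- unclosed quote / trailing escape: ValueError
  | c :: rest, PvShState.normal cur =>
    if c = ' ' ∨ c = '\t' ∨ c = '\r' ∨ c = '\n' then
      match cur with
      | none => pvShlexGo rest (PvShState.normal none)
      | some t => (pvShlexGo rest (PvShState.normal none)).map (t :: ·)
    else if c = '\\' then pvShlexGo rest (PvShState.esc (cur.getD []))
    else if c = '\'' then pvShlexGo rest (PvShState.squote (cur.getD []))
    else if c = '"' then pvShlexGo rest (PvShState.dquote (cur.getD []))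
    else pvShlexGo rest (PvShState.normal (some (cur.getD [] ++ [c])))
  | c :: rest, PvShState.esc t => pvShlexGo rest (PvShState.normal (some (t ++ [c])))
  | c :: rest, PvShState.squote t =>
    if c = '\'' then pvShlexGo rest (PvShState.normal (some t))
    else pvShlexGo rest (PvShState.squote (t ++ [c]))
  | c :: rest, PvShState.dquote t =>
    if c = '"' then pvShlexGo rest (PvShState.normal (some t))
    else if c = '\\' then pvShlexGo rest (PvShState.dqesc t)
    else pvShlexGo rest (PvShState.dquote (t ++ [c]))
  | c :: rest, PvShState.dqesc t =>
    if c = '"' ∨ c = '\\' then pvShlexGo rest (PvShState.dquote (t ++ [c]))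
    else pvShlexGo rest (PvShState.dquote (t ++ ['\\', c]))

-- _normalize_command_text as A's module defines it (try shlex-split, on ValueError fall back)
def pvNormalize (s : List Char) : List Char :=
  match pvShlexGo s (PvShState.normal none) with
  | some toks => PySem.Chars.join [' '] toks
  | none => PySem.Chars.join [' '] (PySem.Chars.split₀ (PySem.Chars.strip s))

-- A's for-loop with early return over the entries
def pvGoA (normalized : List Char) : List String → Bool
  | [] => false
  | entry :: rest =>
    let pfx := pvNormalize entry.toList
    if pfx = [] then pvGoA normalized rest
    else if normalized = pfx ∨ PySem.Chars.startswith normalized (pfx ++ [' ']) then true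
    else pvGoA normalized rest

def command_matches_allowed_prefix_py (command : String) (allowed_commands : Option (List String)) : Bool :=
  pvGoA (pvNormalize command.toList) (allowed_commands.getD [])

-- ===== PORT B =====
-- B's Python tokenizes with a regex scanner over five chunk alternatives
-- (r"""[ \t\r\n]+|'[^']*'|"(?:[^"\\]|\\.)*"|\\.|[^ \t\r\n'"\\]+""", tried in this order at each
-- position, a gap or leftover tail = malformed = none); ported by hand, chunk alternative by
-- chunk alternative, exact on the ASCII domain.
def pvWsChar (c : Char) : Bool := c == ' ' || c == '\t' || c == '\r' || c == '\n'

def pvWordChar (c : Char) : Bool := !(pvWsChar c) && c != '\'' && c != '"' && c != '\\'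

-- the regex piece (?:[^"\\]|\\.)*" after an opening double quote: the raw body and the rest
def pvDqBody : List Char → Option (List Char × List Char)
  | [] => none
  | c :: r =>
    if c = '"' then some ([], r)
    else if c = '\\' then
      match r with
      | [] => none
      | d :: r' => (pvDqBody r').map (fun p => (c :: d :: p.1, p.2))
    else (pvDqBody r).map (fun p => (c :: p.1, p.2))
termination_by s => s.length
decreasing_by all_goals simp

-- re.sub(r'\\([\\"])', r'\1', inner)
def pvUnescape : List Char → List Char
  | [] => []
  | [c] => [c]
  | c :: d :: r =>
    if c = '\\' ∧ (d = '\\' ∨ d = '"') then d :: pvUnescape r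
    else c :: pvUnescape (d :: r)

inductive PvChunk : Type
  | ws : PvChunk                    -- a whitespace run
  | piece : List Char → PvChunk     -- any other chunk, as the word text it contributes

-- _CHUNK matched at the current position: the chunk and the rest of the input (none = no match)
def pvChunk? : List Char → Option (PvChunk × List Char)
  | [] => none
  | c :: r =>
    if pvWsChar c then some (PvChunk.ws, r.dropWhile pvWsChar)
    else if c = '\'' then
      match r.dropWhile (fun d => !(d == '\'')) with
      | _ :: r' => some (PvChunk.piece (r.takeWhile (fun d => !(d == '\''))), r')
      | [] => none
    else if c = '"' then (pvDqBody r).map (fun p => (PvChunk.piece (pvUnescape p.1), p.2))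
    else if c = '\\' then
      match r with
      | [] => none
      | d :: r' => some (PvChunk.piece [d], r')
    else some (PvChunk.piece ((c :: r).takeWhile pvWordChar), (c :: r).dropWhile pvWordChar)

-- the finditer loop of _shell_words: cur is the open word; a failed match at the current
-- position is Python's start/end gap check (fuel length+1 suffices: every chunk consumes a char)
def pvScanGo : Nat → List Char → Option (List Char) → Option (List (List Char))
  | 0, _, _ => none
  | _ + 1, [], none => some []
  | _ + 1, [], some t => some [t]
  | fuel + 1, c :: r, cur =>
    match pvChunk? (c :: r) with
    | none => none
    | some (PvChunk.ws, rest) =>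
      match cur with
      | none => pvScanGo fuel rest none
      | some t => (pvScanGo fuel rest none).map (t :: ·)
    | some (PvChunk.piece p, rest) => pvScanGo fuel rest (some (cur.getD [] ++ p))

def pvTokB (s : List Char) : Option (List (List Char)) := pvScanGo (s.length + 1) s none

-- Source B's _normalize_command_text
def pvNormB (s : List Char) : List Char :=
  match pvTokB s with
  | some toks => PySem.Chars.join [' '] toks
  | none => PySem.Chars.join [' '] (PySem.Chars.split₀ (PySem.Chars.strip s))

def command_matches_allowed_prefix_py_alt (command : String) (allowed_commands : Option (List String)) : Bool :=
  let words := PySem.Chars.splitOn (pvNormB command.toList) [' ']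
  -- {tuple(words[:k]) for k in range(1, len(words) + 1)}
  let prefixes := PySem.Set.ofList
    ((PySem.List.pyRange 1 (words.length + 1) 1).map
      (fun k => PySem.List.slice words none (some k)))
  (allowed_commands.getD []).any (fun e =>
    let p := pvNormB e.toList
    !p.isEmpty && PySem.Set.contains prefixes (PySem.Chars.splitOn p [' ']))

-- ===== PRECONDITION & SPEC =====
def Spec_command_matches_allowed_prefix_py (command : String) (allowed_commands : Option (List String)) (out : Bool) : Prop := out = command_matches_allowed_prefix_py_alt command allowed_commands
instance (command : String) (allowed_commands : Option (List String)) (out : Bool) : Decidable (Spec_command_matches_allowed_prefix_py command allowed_commands out) := by unfold Spec_command_matches_allowed_prefix_py; infer_instance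

-- ===== CLAIM (what is proved, stated in full; the proofs are below) =====
def Claim_equal_command_matches_allowed_prefix_py : Prop := ∀ (command : String) (allowed_commands : Option (List String)), Dom_command_matches_allowed_prefix_py command allowed_commands → Spec_command_matches_allowed_prefix_py command allowed_commands (command_matches_allowed_prefix_py command allowed_commands)

-- ===== LEMMAS AND PROOFS =====

-- pvShlexGo swallows a whitespace run in the normal/no-open-token state
lemma shlex_ws_run (r : List Char) :
    pvShlexGo r (PvShState.normal none) = pvShlexGo (r.dropWhile pvWsChar) (PvShState.normal none) := by
  induction r with
  | nil => rfl
  | cons c r ih =>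
    by_cases hc : pvWsChar c
    · have hc' : c = ' ' ∨ c = '\t' ∨ c = '\r' ∨ c = '\n' := by
        simp [pvWsChar] at hc; tauto
      simp [pvShlexGo, hc', hc, ih]
    · simp [hc]

-- pvShlexGo swallows a word-character run into the open token
lemma shlex_word_run (r : List Char) (t : List Char) :
    pvShlexGo r (PvShState.normal (some t)) =
      pvShlexGo (r.dropWhile pvWordChar) (PvShState.normal (some (t ++ r.takeWhile pvWordChar))) := by
  induction r generalizing t with
  | nil => simp
  | cons c r ih =>
    by_cases hc : pvWordChar c
    · have h1 : ¬ (c = ' ' ∨ c = '\t' ∨ c = '\r' ∨ c = '\n') := by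
        simp [pvWordChar, pvWsChar] at hc; tauto
      have h2 : ¬ c = '\\' := by simp [pvWordChar] at hc; tauto
      have h3 : ¬ c = '\'' := by simp [pvWordChar] at hc; tauto
      have h4 : ¬ c = '"' := by simp [pvWordChar] at hc; tauto
      rw [List.dropWhile_cons_of_pos hc, List.takeWhile_cons_of_pos hc]
      simp only [pvShlexGo, h1, h2, h3, h4, if_false, Option.getD_some]
      rw [ih (t ++ [c])]
      simp
    · rw [List.dropWhile_cons_of_neg hc, List.takeWhile_cons_of_neg hc]
      simp

-- one-step unfoldings of pvDqBody (defined by well-founded recursion)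
lemma pvDqBody_nil : pvDqBody [] = none := by rw [pvDqBody.eq_def]

lemma pvDqBody_quote (r : List Char) : pvDqBody ('"' :: r) = some ([], r) := by
  rw [pvDqBody.eq_def]; simp

lemma pvDqBody_esc_nil : pvDqBody ['\\'] = none := by
  rw [pvDqBody.eq_def]; simp

lemma pvDqBody_esc (d : Char) (r : List Char) :
    pvDqBody ('\\' :: d :: r) = (pvDqBody r).map (fun p => ('\\' :: d :: p.1, p.2)) := by
  rw [pvDqBody.eq_def]; simp

lemma pvDqBody_other (c : Char) (r : List Char) (h1 : c ≠ '"') (h2 : c ≠ '\\') :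
    pvDqBody (c :: r) = (pvDqBody r).map (fun p => (c :: p.1, p.2)) := by
  rw [pvDqBody.eq_def]; simp [h1, h2]

-- pvDqBody consumes at least the closing quote
lemma pvDqBody_length : ∀ (n : Nat) (r : List Char), r.length ≤ n → ∀ (p : List Char × List Char),
    pvDqBody r = some p → p.2.length < r.length := by
  intro n
  induction n with
  | zero =>
    intro r hr p hp
    rw [List.length_eq_zero_iff.mp (Nat.le_zero.mp hr), pvDqBody_nil] at hp
    exact absurd hp (by simp)
  | succ n ihn =>
    intro r hr p hp
    cases r with
    | nil => rw [pvDqBody_nil] at hp; exact absurd hp (by simp)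
    | cons c rest =>
      by_cases hq : c = '"'
      · subst hq; rw [pvDqBody_quote] at hp; cases hp; simp
      · by_cases he : c = '\\'
        · subst he
          cases rest with
          | nil => rw [pvDqBody_esc_nil] at hp; exact absurd hp (by simp)
          | cons d r' =>
            rw [pvDqBody_esc] at hp
            cases hpd : pvDqBody r' with
            | none => rw [hpd] at hp; exact absurd hp (by simp)
            | some p' =>
              rw [hpd] at hp
              simp at hp
              have := ihn r' (by simp at hr ⊢; omega) p' hpd
              cases hp; simp at this ⊢; omega
        · rw [pvDqBody_other c rest hq he] at hp
          cases hpd : pvDqBody rest with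
          | none => rw [hpd] at hp; exact absurd hp (by simp)
          | some p' =>
            rw [hpd] at hp
            simp at hp
            have := ihn rest (by simp at hr ⊢; omega) p' hpd
            cases hp; simp at this ⊢; omega

-- pvShlexGo inside '…' scans to the closing quote
lemma shlex_squote_run (r : List Char) (t : List Char) :
    pvShlexGo r (PvShState.squote t) =
      match r.dropWhile (fun d => !(d == '\'')) with
      | _ :: r' => pvShlexGo r' (PvShState.normal (some (t ++ r.takeWhile (fun d => !(d == '\'')))))
      | [] => none := by
  induction r generalizing t with
  | nil => simp [pvShlexGo]
  | cons c r ih =>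
    by_cases hc : c = '\''
    · subst hc
      simp [pvShlexGo]
    · have hb : (!(c == '\'')) = true := by simp [hc]
      simp only [List.dropWhile_cons, List.takeWhile_cons, hb, if_true]
      simp only [pvShlexGo, hc, if_false]
      rw [ih (t ++ [c])]
      cases List.dropWhile (fun d => !(d == '\'')) r <;> simp

-- pvShlexGo inside "…" is pvDqBody + pvUnescape
lemma shlex_dquote_run : ∀ (n : Nat) (r : List Char), r.length ≤ n → ∀ (t : List Char),
    pvShlexGo r (PvShState.dquote t) =
      match pvDqBody r with
      | some p => pvShlexGo p.2 (PvShState.normal (some (t ++ pvUnescape p.1)))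
      | none => none := by
  intro n
  induction n with
  | zero =>
    intro r hr t
    rw [List.length_eq_zero_iff.mp (Nat.le_zero.mp hr)]
    simp [pvShlexGo, pvDqBody_nil]
  | succ n ihn =>
    intro r hr t
    cases r with
    | nil => simp [pvShlexGo, pvDqBody_nil]
    | cons c r =>
      by_cases hq : c = '"'
      · subst hq
        rw [pvDqBody_quote]
        simp [pvShlexGo, pvUnescape]
      · by_cases hb : c = '\\'
        · subst hb
          cases r with
          | nil => simp [pvShlexGo, pvDqBody_esc_nil]
          | cons d r' =>
            rw [pvDqBody_esc]
            simp only [pvShlexGo, hq, if_false, reduceIte]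
            by_cases hd : d = '"' ∨ d = '\\'
            · rw [if_pos hd, ihn r' (by simp at hr ⊢; omega) (t ++ [d])]
              cases hpd : pvDqBody r' with
              | none => simp
              | some p =>
                have hdu : pvUnescape ('\\' :: d :: p.1) = d :: pvUnescape p.1 := by
                  simp [pvUnescape, hd.symm]
                simp [hdu, List.append_assoc]
            · rw [if_neg hd, ihn r' (by simp at hr ⊢; omega) (t ++ ['\\', d])]
              cases hpd : pvDqBody r' with
              | none => simp
              | some p =>
                have hd1 : d ≠ '\\' := by tauto
                have hd2 : d ≠ '"' := by tauto
                have hdu : pvUnescape ('\\' :: d :: p.1) = '\\' :: pvUnescape (d :: p.1) := by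
                  simp [pvUnescape, hd1, hd2]
                have hdu2 : pvUnescape (d :: p.1) = d :: pvUnescape p.1 := by
                  cases hp1 : p.1 with
                  | nil => simp [pvUnescape]
                  | cons e r2 =>
                    have hne : ¬ (d = '\\' ∧ (e = '\\' ∨ e = '"')) := by tauto
                    simp [pvUnescape, hne]
                simp [hdu, hdu2, List.append_assoc]
        · rw [pvDqBody_other c r hq hb]
          simp only [pvShlexGo, hq, hb, if_false]
          rw [ihn r (by simp at hr ⊢; omega) (t ++ [c])]
          cases hpd : pvDqBody r with
          | none => simp
          | some p =>
            have hdu : pvUnescape (c :: p.1) = c :: pvUnescape p.1 := by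
              cases hp1 : p.1 with
              | nil => simp [pvUnescape]
              | cons e r2 =>
                have : ¬ (c = '\\' ∧ (e = '\\' ∨ e = '"')) := by tauto
                simp [pvUnescape, this]
            simp [hdu, List.append_assoc]

-- the regex scanner computes A's state-machine tokenization
lemma scanGo_eq_shlexGo : ∀ (fuel : Nat) (s : List Char), s.length < fuel → ∀ (cur : Option (List Char)),
    pvScanGo fuel s cur = pvShlexGo s (PvShState.normal cur) := by
  intro fuel
  induction fuel with
  | zero => intro s hs; omega
  | succ f ihf =>
    intro s hs cur
    cases s with
    | nil => cases cur <;> rfl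
    | cons c r =>
      by_cases hws : pvWsChar c
      · have hc' : c = ' ' ∨ c = '\t' ∨ c = '\r' ∨ c = '\n' := by
          simp [pvWsChar] at hws; tauto
        have hstep : pvShlexGo (c :: r) (PvShState.normal cur) =
            match cur with
            | none => pvShlexGo r (PvShState.normal none)
            | some t => (pvShlexGo r (PvShState.normal none)).map (t :: ·) := by
          simp [pvShlexGo, hc']
        have hlen : (r.dropWhile pvWsChar).length < f := by
          have := List.length_dropWhile_le pvWsChar r
          simp at hs; omega
        rw [hstep, shlex_ws_run r]
        simp only [pvScanGo, pvChunk?, hws, if_true]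
        cases cur with
        | none => rw [ihf _ hlen none]
        | some t => rw [ihf _ hlen none]
      · have hws' : ¬ (c = ' ' ∨ c = '\t' ∨ c = '\r' ∨ c = '\n') := by
          simp [pvWsChar] at hws; tauto
        by_cases hsq : c = '\''
        · subst hsq
          have hstep : pvShlexGo ('\'' :: r) (PvShState.normal cur) =
              pvShlexGo r (PvShState.squote (cur.getD [])) := by
            simp [pvShlexGo]
          rw [hstep, shlex_squote_run r (cur.getD [])]
          simp only [pvScanGo, pvChunk?, hws, Bool.false_eq_true, if_false, if_true]
          cases hdr : r.dropWhile (fun d => !(d == '\'')) with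
          | nil => rfl
          | cons q r' =>
            have hlen : r'.length < f := by
              have h1 : (r.dropWhile (fun d => !(d == '\''))).length ≤ r.length :=
                List.length_dropWhile_le _ r
              rw [hdr] at h1
              simp at h1 hs
              omega
            simp only []
            rw [ihf r' hlen]
        · by_cases hdq : c = '"'
          · subst hdq
            have hstep : pvShlexGo ('"' :: r) (PvShState.normal cur) =
                pvShlexGo r (PvShState.dquote (cur.getD [])) := by
              simp [pvShlexGo]
            rw [hstep, shlex_dquote_run r.length r (le_refl _) (cur.getD [])]
            simp only [pvScanGo, pvChunk?, hws, Bool.false_eq_true, hsq, if_false, reduceIte]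
            cases hpd : pvDqBody r with
            | none => rfl
            | some p =>
              have hlen : p.2.length < f := by
                have := pvDqBody_length r.length r (le_refl _) p hpd
                simp at hs; omega
              simp only [Option.map_some]
              rw [ihf p.2 hlen]
          · by_cases hes : c = '\\'
            · subst hes
              cases r with
              | nil =>
                have hstep : pvShlexGo ['\\'] (PvShState.normal cur) = none := by
                  simp [pvShlexGo]
                rw [hstep]
                simp only [pvScanGo, pvChunk?, hws, Bool.false_eq_true, hsq, hdq, if_false,
                  reduceIte]
              | cons d r' =>
                have hstep : pvShlexGo ('\\' :: d :: r') (PvShState.normal cur) =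
                    pvShlexGo r' (PvShState.normal (some (cur.getD [] ++ [d]))) := by
                  simp [pvShlexGo]
                rw [hstep]
                simp only [pvScanGo, pvChunk?, hws, Bool.false_eq_true, hsq, hdq, if_false,
                  reduceIte]
                rw [ihf r' (by simp at hs ⊢; omega)]
            · have hwc : pvWordChar c = true := by
                have h1 : pvWsChar c = false := by simpa using hws
                simp [pvWordChar, h1, bne_iff_ne, hsq, hdq, hes]
              have hstep : pvShlexGo (c :: r) (PvShState.normal cur) =
                  pvShlexGo r (PvShState.normal (some (cur.getD [] ++ [c]))) := by
                simp [pvShlexGo, hws', hsq, hdq, hes]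
              rw [hstep, shlex_word_run r (cur.getD [] ++ [c])]
              simp only [pvScanGo, pvChunk?, hws, Bool.false_eq_true, hsq, hdq, hes, if_false]
              rw [List.takeWhile_cons_of_pos hwc, List.dropWhile_cons_of_pos hwc]
              have hlen : (r.dropWhile pvWordChar).length < f := by
                have := List.length_dropWhile_le pvWordChar r
                simp at hs; omega
              rw [ihf _ hlen]
              simp

lemma normB_eq_normalize (s : List Char) : pvNormB s = pvNormalize s := by
  unfold pvNormB pvNormalize pvTokB
  rw [scanGo_eq_shlexGo (s.length + 1) s (by omega) none]

-- structural version of x.split(" ")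
def pvWsp : List Char → List (List Char)
  | [] => [[]]
  | c :: r =>
    if c = ' ' then [] :: pvWsp r
    else
      match pvWsp r with
      | [] => [[c]]        -- unreachable: pvWsp never returns []
      | w :: ws => (c :: w) :: ws

lemma pvWsp_ne_nil (x : List Char) : pvWsp x ≠ [] := by
  cases x with
  | nil => simp [pvWsp]
  | cons c r =>
    simp only [pvWsp]
    split_ifs
    · simp
    · cases pvWsp r <;> simp

lemma splitOn_go_eq (fuel : Nat) : ∀ (l : List Char), l.length < fuel → ∀ (cur : List Char) (acc : List (List Char)),
    PySem.Chars.splitOn.go [' '] fuel l cur acc =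
      acc.reverse ++ (match pvWsp l with
        | [] => []
        | w :: ws => (cur.reverse ++ w) :: ws) := by
  induction fuel with
  | zero => intro l hl; omega
  | succ f ihf =>
    intro l hl cur acc
    cases l with
    | nil => simp [PySem.Chars.splitOn.go, pvWsp]
    | cons c rest =>
      by_cases hc : c = ' '
      · have hpre : [' '].isPrefixOf (c :: rest) = true := by simp [hc, List.isPrefixOf]
        rw [show PySem.Chars.splitOn.go [' '] (f+1) (c :: rest) cur acc =
            PySem.Chars.splitOn.go [' '] f (List.drop 1 (c :: rest)) [] (cur.reverse :: acc) by
          simp [PySem.Chars.splitOn.go, hpre]]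
        rw [show List.drop 1 (c :: rest) = rest from rfl]
        rw [ihf rest (by simpa using hl) [] (cur.reverse :: acc)]
        obtain ⟨w, ws, hw⟩ := List.exists_cons_of_ne_nil (pvWsp_ne_nil rest)
        simp [pvWsp, hc, hw]
      · have hpre : [' '].isPrefixOf (c :: rest) = false := by
          simp [List.isPrefixOf]; exact fun h => hc h.symm
        rw [show PySem.Chars.splitOn.go [' '] (f+1) (c :: rest) cur acc =
            PySem.Chars.splitOn.go [' '] f rest (c :: cur) acc by
          simp [PySem.Chars.splitOn.go, hpre]]
        rw [ihf rest (by simpa using hl) (c :: cur) acc]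
        obtain ⟨w, ws, hw⟩ := List.exists_cons_of_ne_nil (pvWsp_ne_nil rest)
        simp [pvWsp, hc, hw]

lemma splitOn_space_eq_pvWsp (x : List Char) : PySem.Chars.splitOn x [' '] = pvWsp x := by
  unfold PySem.Chars.splitOn
  rw [splitOn_go_eq (x.length + 1) x (by omega) [] []]
  obtain ⟨w, ws, hw⟩ := List.exists_cons_of_ne_nil (pvWsp_ne_nil x)
  simp [hw]

-- " ".join inverts the split on " "
lemma join_pvWsp (x : List Char) : PySem.Chars.join [' '] (pvWsp x) = x := by
  induction x with
  | nil => simp [pvWsp, PySem.Chars.join_singleton]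
  | cons c r ih =>
    by_cases hc : c = ' '
    · obtain ⟨w, ws, hw⟩ := List.exists_cons_of_ne_nil (pvWsp_ne_nil r)
      rw [hw] at ih
      simp [pvWsp, hc, hw, PySem.Chars.join_cons_cons, ih]
    · obtain ⟨w, ws, hw⟩ := List.exists_cons_of_ne_nil (pvWsp_ne_nil r)
      rw [hw] at ih
      cases ws with
      | nil => simp_all [pvWsp, PySem.Chars.join_singleton]
      | cons w2 ws2 => simp_all [pvWsp, PySem.Chars.join_cons_cons]

lemma pvWsp_injective {a b : List Char} (h : pvWsp a = pvWsp b) : a = b := by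
  have := congrArg (PySem.Chars.join [' ']) h
  rwa [join_pvWsp, join_pvWsp] at this

-- splitting at an explicit separator splits the word list
lemma pvWsp_append_space (p r : List Char) : pvWsp (p ++ ' ' :: r) = pvWsp p ++ pvWsp r := by
  induction p with
  | nil => simp [pvWsp]
  | cons c p ih =>
    by_cases hc : c = ' '
    · simp [pvWsp, hc, ih]
    · obtain ⟨w, ws, hw⟩ := List.exists_cons_of_ne_nil (pvWsp_ne_nil p)
      simp [pvWsp, hc, ih, hw]

-- " ".join over a concatenation of nonempty token lists
lemma join_append_cons (x : List Char) (xs : List (List Char)) (w : List Char) (ws : List (List Char)) :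
    PySem.Chars.join [' '] ((x :: xs) ++ w :: ws) =
      PySem.Chars.join [' '] (x :: xs) ++ ' ' :: PySem.Chars.join [' '] (w :: ws) := by
  induction xs generalizing x with
  | nil => simp [PySem.Chars.join_cons_cons, PySem.Chars.join_singleton]
  | cons x2 xs2 ih =>
    rw [show (x :: x2 :: xs2) ++ w :: ws = x :: x2 :: (xs2 ++ w :: ws) by simp,
      PySem.Chars.join_cons_cons [' '] x x2 (xs2 ++ w :: ws),
      show x2 :: (xs2 ++ w :: ws) = (x2 :: xs2) ++ w :: ws by simp,
      ih x2, PySem.Chars.join_cons_cons]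
    simp [List.append_assoc]

-- A's per-entry test is word-list prefix
lemma match_iff_prefix (n p : List Char) :
    (n = p ∨ PySem.Chars.startswith n (p ++ [' ']) = true) ↔ pvWsp p <+: pvWsp n := by
  constructor
  · rintro (rfl | h)
    · exact List.prefix_refl _
    · rw [PySem.Chars.startswith_iff] at h
      obtain ⟨r, hr⟩ := h
      subst hr
      rw [show p ++ [' '] ++ r = p ++ ' ' :: r by simp, pvWsp_append_space]
      exact ⟨pvWsp r, rfl⟩
  · rintro ⟨t, ht⟩
    cases t with
    | nil =>
      left
      exact (pvWsp_injective (by simpa using ht)).symm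
    | cons w ws =>
      right
      rw [PySem.Chars.startswith_iff]
      have hj := join_pvWsp n
      rw [← ht] at hj
      obtain ⟨a, as, ha⟩ := List.exists_cons_of_ne_nil (pvWsp_ne_nil p)
      rw [ha, join_append_cons, ← ha, join_pvWsp p] at hj
      exact ⟨PySem.Chars.join [' '] (w :: ws), by rw [← hj]; simp⟩

-- membership in B's prefix set is word-list prefix (for a nonempty word list)
lemma mem_prefixSet_iff (n p : List Char) :
    (PySem.Chars.splitOn p [' '] ∈ PySem.Set.ofList
      ((PySem.List.pyRange 1 ((PySem.Chars.splitOn n [' ']).length + 1) 1).map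
        (fun k => PySem.List.slice (PySem.Chars.splitOn n [' ']) none (some k)))) ↔
    pvWsp p <+: pvWsp n := by
  rw [PySem.Set.mem_ofList, List.mem_map, splitOn_space_eq_pvWsp, splitOn_space_eq_pvWsp]
  constructor
  · rintro ⟨k, hk, hsl⟩
    rw [PySem.List.mem_pyRange_one] at hk
    have h0 : (0:Int) ≤ k := by omega
    rw [PySem.List.slice_to _ h0] at hsl
    rw [← hsl]
    exact List.take_prefix _ _
  · intro hpre
    refine ⟨(pvWsp p).length, ?_, ?_⟩
    · rw [PySem.List.mem_pyRange_one]
      have h1 : 1 ≤ (pvWsp p).length := by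
        have := pvWsp_ne_nil p
        cases h : pvWsp p with
        | nil => exact absurd h this
        | cons a as => simp
      have h2 : (pvWsp p).length ≤ (pvWsp n).length := hpre.length_le
      omega
    · rw [PySem.List.slice_to _ (by positivity), Int.toNat_natCast]
      exact (List.prefix_iff_eq_take.mp hpre).symm

-- A's loop is B's any
lemma goA_eq_any (n : List Char) (es : List String) :
    pvGoA n es = es.any (fun e =>
      let p := pvNormB e.toList
      !p.isEmpty && PySem.Set.contains
        (PySem.Set.ofList ((PySem.List.pyRange 1 ((PySem.Chars.splitOn n [' ']).length + 1) 1).map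
          (fun k => PySem.List.slice (PySem.Chars.splitOn n [' ']) none (some k))))
        (PySem.Chars.splitOn p [' '])) := by
  induction es with
  | nil => rfl
  | cons e rest ih =>
    simp only [normB_eq_normalize] at ih ⊢
    simp only [pvGoA, List.any_cons]
    by_cases hp : pvNormalize e.toList = []
    · simp only [hp, List.isEmpty_nil, Bool.not_true, Bool.false_and, Bool.false_or]
      exact ih
    · simp only [hp, if_false]
      have hiff : (n = pvNormalize e.toList
            ∨ PySem.Chars.startswith n (pvNormalize e.toList ++ [' ']) = true) ↔
          PySem.Set.contains
            (PySem.Set.ofList ((PySem.List.pyRange 1 ((PySem.Chars.splitOn n [' ']).length + 1) 1).map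
              (fun k => PySem.List.slice (PySem.Chars.splitOn n [' ']) none (some k))))
            (PySem.Chars.splitOn (pvNormalize e.toList) [' ']) = true := by
        rw [PySem.Set.contains_iff, mem_prefixSet_iff, match_iff_prefix]
      have hne : ((pvNormalize e.toList).isEmpty) = false := by
        simpa [List.isEmpty_iff] using hp
      split_ifs with hcond
      · rw [hiff.mp hcond, hne]
        rfl
      · have hc : PySem.Set.contains
            (PySem.Set.ofList ((PySem.List.pyRange 1 ((PySem.Chars.splitOn n [' ']).length + 1) 1).map
              (fun k => PySem.List.slice (PySem.Chars.splitOn n [' ']) none (some k))))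
            (PySem.Chars.splitOn (pvNormalize e.toList) [' ']) = false := by
          cases h : PySem.Set.contains
            (PySem.Set.ofList ((PySem.List.pyRange 1 ((PySem.Chars.splitOn n [' ']).length + 1) 1).map
              (fun k => PySem.List.slice (PySem.Chars.splitOn n [' ']) none (some k))))
            (PySem.Chars.splitOn (pvNormalize e.toList) [' ']) with
          | true => exact absurd (hiff.mpr h) hcond
          | false => rfl
        rw [hc, ih]
        simp

-- ===== VERDICT (by name: the statement is the Claim_ definition above) =====
theorem command_matches_allowed_prefix_py_spec : Claim_equal_command_matches_allowed_prefix_py := by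
  intro command allowed_commands _
  unfold Spec_command_matches_allowed_prefix_py
  unfold command_matches_allowed_prefix_py command_matches_allowed_prefix_py_alt
  rw [normB_eq_normalize]
  exact goA_eq_any _ _
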